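-- pv_equiv track=rewrite | github.com/yaejinpark/python-lc | codewars/python_mhardy/your_order_please_mhardy.py | order
-- ===== SOURCE A (Python) =====
-- def order(sentence):
--     word_list = [i for i in sentence.split(" ")]
--     sorted_list = []
--     for i in range(1,10):
--         for word in word_list:
--             if str(i) in word:
--                 sorted_list.append(word)
--
--     return " ".join(sorted_list)
-- ===== SOURCE B (Python) =====
-- def order(sentence):
--     buckets = [(d, []) for d in "123456789"]
--     for word in sentence.split(" "):
--         for d, bucket in buckets:
--             if d in word:
--                 bucket.append(word)
--     return " ".join(w for _, b in buckets for w in b)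
-- ===== Notes on version B (the rewrite author's own statement) =====
-- stated objective: alternative
-- what changed: Replaces A's nine full passes over the word list (one per digit 1-9) with a single pass over the words that distributes each word into per-digit buckets, concatenated at the end.
import Mathlib
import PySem

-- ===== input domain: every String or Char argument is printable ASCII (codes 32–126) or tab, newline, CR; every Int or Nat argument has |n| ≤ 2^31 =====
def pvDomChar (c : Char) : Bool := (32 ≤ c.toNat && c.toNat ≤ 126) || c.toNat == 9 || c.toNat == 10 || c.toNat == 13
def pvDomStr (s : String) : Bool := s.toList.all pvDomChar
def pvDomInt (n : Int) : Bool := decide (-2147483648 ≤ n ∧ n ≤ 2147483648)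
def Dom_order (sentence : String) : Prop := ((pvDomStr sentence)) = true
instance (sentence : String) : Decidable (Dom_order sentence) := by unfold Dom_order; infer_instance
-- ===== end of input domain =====

-- B replaces A's nine passes over the word list (one per digit) with a single pass
-- distributing each word into per-digit buckets; buckets are concatenated at the end.
-- ===== PORT A =====
def order (sentence : String) : String :=
  let word_list := (PySem.Str.split? sentence " ").getD []
  let sorted_list := (PySem.List.pyRange 1 10 1).foldl (fun acc i =>
    word_list.foldl (fun acc word =>
      if PySem.Str.isIn (PySem.Int.toStr i) word then acc ++ [word] else acc) acc) []
  PySem.Str.join " " sorted_list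

-- ===== PORT B =====
def order_alt (sentence : String) : String :=
  let buckets0 := ("123456789".toList).map (fun d => (String.ofList [d], ([] : List String)))
  let buckets := ((PySem.Str.split? sentence " ").getD []).foldl (fun bs word =>
    bs.map (fun p => (p.1, if PySem.Str.isIn p.1 word then p.2 ++ [word] else p.2))) buckets0
  PySem.Str.join " " (buckets.flatMap (fun p => p.2))

-- ===== PRECONDITION & SPEC =====
def Spec_order (sentence : String) (out : String) : Prop := out = order_alt sentence
instance (sentence : String) (out : String) : Decidable (Spec_order sentence out) := by unfold Spec_order; infer_instance

-- ===== CLAIM (what is proved, stated in full; the proofs are below) =====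
def Claim_equal_order : Prop := ∀ (sentence : String), Dom_order sentence → Spec_order sentence (order sentence)

-- ===== LEMMAS AND PROOFS =====

-- B's bucket loop: after folding all words, each bucket holds its filter of the words.
theorem bucket_inv (words : List String) : ∀ (bs : List (String × List String)),
    words.foldl (fun bs word =>
      bs.map (fun p => (p.1, if PySem.Str.isIn p.1 word then p.2 ++ [word] else p.2))) bs
    = bs.map (fun p => (p.1, p.2 ++ words.filter (fun w => PySem.Str.isIn p.1 w))) := by
  induction words with
  | nil => intro bs; simp
  | cons w ws ih =>
    intro bs
    simp only [List.foldl_cons, ih, List.map_map]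
    refine List.map_congr_left (fun p _ => ?_)
    simp only [Function.comp_apply, List.filter_cons]
    split_ifs <;> simp

-- ===== VERDICT (by name: the statement is the Claim_ definition above) =====
theorem order_spec : Claim_equal_order := by
  intro sentence _
  unfold Spec_order order order_alt
  simp only [bucket_inv, List.map_map, List.flatMap_map]
  have hr : PySem.List.pyRange 1 10 1 = [1,2,3,4,5,6,7,8,9] := by decide
  rw [hr]
  simp only [List.foldl_cons, List.foldl_nil, PySem.List.foldl_append_if_eq_filter]
  have hd : "123456789".toList = ['1','2','3','4','5','6','7','8','9'] := by decide
  have t1 : PySem.Int.toChars 1 = ['1'] := by decide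
  have t2 : PySem.Int.toChars 2 = ['2'] := by decide
  have t3 : PySem.Int.toChars 3 = ['3'] := by decide
  have t4 : PySem.Int.toChars 4 = ['4'] := by decide
  have t5 : PySem.Int.toChars 5 = ['5'] := by decide
  have t6 : PySem.Int.toChars 6 = ['6'] := by decide
  have t7 : PySem.Int.toChars 7 = ['7'] := by decide
  have t8 : PySem.Int.toChars 8 = ['8'] := by decide
  have t9 : PySem.Int.toChars 9 = ['9'] := by decide
  have hf : ∀ (d : Char) (ws : List String),
      List.filter (fun w => PySem.Chars.isIn [d] w.toList) ws
      = List.filter (PySem.Str.isIn (String.ofList [d])) ws := by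
    intro d ws
    refine List.filter_congr (fun w _ => ?_)
    simp [PySem.Str.isIn]
  rw [hd]
  simp [PySem.Str.isIn, PySem.Int.toStr, t1, t2, t3, t4, t5, t6, t7, t8, t9, List.flatMap_cons,
    List.flatMap_nil, List.append_assoc, hf]
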